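-- pv_equiv track=rewrite | github.com/cau777/PythonCodeAnalyser | code_analyzer.py | less_spaces_before_comment
-- ===== SOURCE A (Python) =====
-- def find_comment(line: str):
--     return line.find("#")
--
-- def less_spaces_before_comment(line: str):
--     comment_start = find_comment(line)
--
--     if comment_start == -1 or comment_start == 0:
--         return False
--
--     spaces = 0
--     for x in range(comment_start - 1, -1, -1):
--         if line[x] == " ":
--             spaces += 1
--         else:
--             break
--
--     return spaces < 2
-- ===== SOURCE B (Python) =====
-- def less_spaces_before_comment(line: str):
--     i = line.find("#")
--     if i <= 0:
--         return False
--     return not (i >= 2 and line[i - 1] == " " and line[i - 2] == " ")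
-- ===== Notes on version B (the rewrite author's own statement) =====
-- stated objective: simpler
-- what changed: Replaces the backward space-counting loop before the comment marker with a closed-form constant check of the two characters immediately preceding it (the spaces<2 test depends only on those two).
import Mathlib
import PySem

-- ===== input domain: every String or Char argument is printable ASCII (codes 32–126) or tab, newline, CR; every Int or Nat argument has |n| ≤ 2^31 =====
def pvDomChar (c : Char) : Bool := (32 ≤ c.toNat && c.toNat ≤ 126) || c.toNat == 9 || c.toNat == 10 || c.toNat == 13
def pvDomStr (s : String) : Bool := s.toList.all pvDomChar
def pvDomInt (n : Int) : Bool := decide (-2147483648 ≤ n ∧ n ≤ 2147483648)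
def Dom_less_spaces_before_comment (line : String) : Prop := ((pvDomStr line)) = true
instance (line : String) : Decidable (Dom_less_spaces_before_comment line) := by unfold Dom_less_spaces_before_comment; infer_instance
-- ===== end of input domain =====

-- B replaces A's backward space-counting loop by a constant two-character check; objective: simpler.

-- ===== PORT A =====
-- the for-loop with break, over range(comment_start-1, -1, -1)
def pvLoopA (cs : List Char) (idxs : List Int) (spaces : Int) : Int :=
  match idxs with
  | [] => spaces
  | x :: rest =>
    if PySem.List.pyGet? cs x = some ' ' then pvLoopA cs rest (spaces + 1)
    else spaces

def less_spaces_before_comment (line : String) : Bool :=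
  let comment_start := PySem.Str.find line "#"
  if comment_start = -1 ∨ comment_start = 0 then false
  else
    decide (pvLoopA line.toList (PySem.List.pyRange (comment_start - 1) (-1) (-1)) 0 < 2)

-- ===== PORT B =====
def less_spaces_before_comment_alt (line : String) : Bool :=
  let i := PySem.Str.find line "#"
  if i ≤ 0 then false
  else
    !(decide (2 ≤ i) && (PySem.List.pyGet? line.toList (i - 1) == some ' ')
        && (PySem.List.pyGet? line.toList (i - 2) == some ' '))

-- ===== PRECONDITION & SPEC =====
def Spec_less_spaces_before_comment (line : String) (out : Bool) : Prop := out = less_spaces_before_comment_alt line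
instance (line : String) (out : Bool) : Decidable (Spec_less_spaces_before_comment line out) := by unfold Spec_less_spaces_before_comment; infer_instance

-- ===== CLAIM (what is proved, stated in full; the proofs are below) =====
def Claim_equal_less_spaces_before_comment : Prop := ∀ (line : String), Dom_less_spaces_before_comment line → Spec_less_spaces_before_comment line (less_spaces_before_comment line)

-- ===== LEMMAS AND PROOFS =====
theorem pvLoopA_ge (cs : List Char) (idxs : List Int) (s : Int) : s ≤ pvLoopA cs idxs s := by
  induction idxs generalizing s with
  | nil => simp [pvLoopA]
  | cons x rest ih =>
    simp only [pvLoopA]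
    split
    · exact le_trans (by omega) (ih (s + 1))
    · exact le_refl s

theorem find_go_ge (sub cs : List Char) (k : Nat) : -1 ≤ PySem.Chars.find.go sub cs k := by
  induction cs generalizing k with
  | nil => simp only [PySem.Chars.find.go]; split <;> omega
  | cons c rest ih =>
    simp only [PySem.Chars.find.go]
    split
    · omega
    · exact ih (k + 1)

theorem find_ge_neg_one (s sub : String) : -1 ≤ PySem.Str.find s sub := by
  simp only [PySem.Str.find, PySem.Chars.find]
  exact find_go_ge _ _ 0

-- ===== VERDICT (by name: the statement is the Claim_ definition above) =====
theorem less_spaces_before_comment_spec : Claim_equal_less_spaces_before_comment := by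
  intro line _
  unfold Spec_less_spaces_before_comment
  unfold less_spaces_before_comment less_spaces_before_comment_alt
  have hge := find_ge_neg_one line "#"
  set i := PySem.Str.find line "#" with hi
  clear_value i
  by_cases h0 : i ≤ 0
  · have : i = -1 ∨ i = 0 := by omega
    simp [this, h0]
  · push_neg at h0
    have hne : ¬ (i = -1 ∨ i = 0) := by omega
    simp only [if_neg hne, if_neg (by omega : ¬ i ≤ 0)]
    by_cases h1 : i = 1
    · subst h1
      rw [show (1:Int) - 1 = 0 by ring,
          PySem.List.pyRange_neg_one_cons (by omega : (-1:Int) < 0),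
          show (0:Int) - 1 = -1 by ring,
          PySem.List.pyRange_neg_one_eq_nil (le_refl (-1))]
      simp only [pvLoopA]
      split <;> simp
    · have h2 : 2 ≤ i := by omega
      rw [PySem.List.pyRange_neg_one_cons (by omega : (-1:Int) < i - 1),
          PySem.List.pyRange_neg_one_cons (by omega : (-1:Int) < i - 1 - 1),
          show i - 1 - 1 = i - 2 by ring]
      simp only [pvLoopA]
      by_cases g1 : PySem.List.pyGet? line.toList (i - 1) = some ' '
      · by_cases g2 : PySem.List.pyGet? line.toList (i - 2) = some ' '
        · have h22 := pvLoopA_ge line.toList (PySem.List.pyRange (i - 2 - 1) (-1) (-1)) (0 + 1 + 1)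
          rw [show (0:Int) + 1 + 1 = 2 from by ring] at h22
          simp only [pvLoopA, if_pos g1, if_pos g2]
          simp only [g1, g2, beq_self_eq_true, decide_eq_true_eq] at *
          simp [h2]
          omega
        · simp [pvLoopA, g1, g2, h2]
      · simp [pvLoopA, g1, h2]
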